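-- pv_equiv track=rewrite | github.com/Rickvlaar/advent2021 | day_24.py | split_programs
-- ===== SOURCE A (Python) =====
-- def split_programs(commands: list[list[str]]):
--     programs = dict()
--     no = 1
--     commands_in_program = []
--     for command in commands:
--         if command[0] == 'inp':
--             commands_in_program = [command]
--             programs[no] = commands_in_program
--             no += 1
--         else:
--             commands_in_program.append(command)
--     return programs
-- ===== SOURCE B (Python) =====
-- def split_programs(commands: list[list[str]]):
--     # Single backwards pass: walking from the end, each command is buffered
--     # (in reverse) until its group's leading 'inp' is met, which completes the
--     # group.  Commands before the first 'inp' are left in the buffer and dropped.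
--     groups = []
--     body = []
--     for command in reversed(commands):
--         body.append(command)
--         if command[0] == 'inp':
--             groups.append(body[::-1])
--             body = []
--     groups.reverse()
--     return {no: body for no, body in enumerate(groups, start=1)}
-- ===== Notes on version B (the rewrite author's own statement) =====
-- stated objective: alternative
-- what changed: A builds the dict during a forward pass, mutating the current group through a list aliased as programs[no-1]; B makes a single backwards pass that completes each group when it reaches the group's own leading 'inp' command and numbers the finished groups afterwards with enumerate.
import Mathlib
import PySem

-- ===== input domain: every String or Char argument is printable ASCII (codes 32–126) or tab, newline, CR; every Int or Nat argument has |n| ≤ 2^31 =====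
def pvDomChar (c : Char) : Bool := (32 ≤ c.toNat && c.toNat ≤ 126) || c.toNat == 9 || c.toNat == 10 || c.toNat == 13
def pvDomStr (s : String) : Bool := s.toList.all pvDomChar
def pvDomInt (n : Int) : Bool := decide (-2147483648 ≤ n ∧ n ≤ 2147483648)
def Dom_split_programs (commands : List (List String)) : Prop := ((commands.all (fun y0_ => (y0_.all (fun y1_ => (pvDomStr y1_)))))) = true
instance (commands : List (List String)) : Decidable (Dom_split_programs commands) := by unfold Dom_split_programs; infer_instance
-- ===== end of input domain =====

-- B replaces A's dict-plus-aliased-accumulator loop by a single backwards pass that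
-- completes each group at its leading 'inp' and numbers the finished groups at the end
-- (objective: alternative decomposition, same O(n) cost).

-- ===== PORT A =====
-- loop body of A; `commands_in_program.append(command)` mutates the list aliased as
-- programs[no-1], which is stored in the dict exactly when 2 ≤ no — the aliased
-- mutation is modelled exactly by rewriting that key's value when 2 ≤ no.
def pvStepA (st : PySem.Dict Int (List (List String)) × Int × List (List String))
    (command : List String) :
    PySem.Dict Int (List (List String)) × Int × List (List String) :=
  let programs := st.1
  let no := st.2.1
  let cur := st.2.2
  if PySem.List.pyGet? command 0 == some "inp" then
    (programs.insert no [command], no + 1, [command])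
  else
    let cur' := cur ++ [command]
    ((if 2 ≤ no then programs.modify (no - 1) [] (fun _ => cur') else programs), no, cur')

def split_programs (commands : List (List String)) : List (Int × List (List String)) :=
  (commands.foldl pvStepA (PySem.Dict.empty, 1, [])).1.items

-- ===== PORT B =====
-- loop body of B: buffer commands (in reverse) until the group's own 'inp' arrives,
-- which completes the group.
def pvStepB (st : List (List (List String)) × List (List String)) (command : List String) :
    List (List (List String)) × List (List String) :=
  let body' := st.2 ++ [command]
  if PySem.List.pyGet? command 0 == some "inp" then (st.1 ++ [body'.reverse], []) else (st.1, body')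

def split_programs_alt (commands : List (List String)) : List (Int × List (List String)) :=
  let st := commands.reverse.foldl pvStepB ([], [])
  let groups := st.1.reverse
  ((PySem.List.enumerate groups 1).foldl
      (fun (d : PySem.Dict Int (List (List String))) p => d.insert p.1 p.2)
      PySem.Dict.empty).items

-- ===== PRECONDITION & SPEC =====
-- Pre_ excludes inputs containing an empty command list, on which Python A (and B alike)
-- raises IndexError at `command[0]`.
def Pre_split_programs (commands : List (List String)) : Prop :=
  ∀ c ∈ commands, c ≠ []
instance (commands : List (List String)) : Decidable (Pre_split_programs commands) := by
  unfold Pre_split_programs; infer_instance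

def pvWitness_split_programs : List (List String) :=
  [["inp", "w"], ["add", "x", "y"], ["inp", "z"]]

def Spec_split_programs (commands : List (List String)) (out : List (Int × List (List String))) : Prop := out = split_programs_alt commands
instance (commands : List (List String)) (out : List (Int × List (List String))) : Decidable (Spec_split_programs commands out) := by unfold Spec_split_programs; infer_instance

-- ===== CLAIM (what is proved, stated in full; the proofs are below) =====
def Claim_equal_split_programs : Prop := ∀ (commands : List (List String)), Dom_split_programs commands → Pre_split_programs commands → Spec_split_programs commands (split_programs commands)

-- ===== LEMMAS AND PROOFS =====

-- `command[0] == 'inp'` as a predicate on a command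
def pvIsInp (c : List String) : Bool := PySem.List.pyGet? c 0 == some "inp"

-- the groups of a command list: each starts at an 'inp' and runs to the next 'inp';
-- commands before the first 'inp' belong to no group
def gAll : List (List String) → List (List (List String))
  | [] => []
  | c :: cs =>
    if pvIsInp c then
      (c :: cs.takeWhile (fun x => !pvIsInp x)) :: gAll (cs.dropWhile (fun x => !pvIsInp x))
    else gAll cs
termination_by l => l.length
decreasing_by
  · have := List.length_dropWhile_le (fun x => !pvIsInp x) cs
    simp; omega
  · simp

lemma gAll_dropWhile (cs : List (List String)) :
    gAll (cs.dropWhile (fun x => !pvIsInp x)) = gAll cs := by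
  induction cs with
  | nil => rfl
  | cons c cs ih =>
    by_cases h : pvIsInp c = true
    · simp [h]
    · simp only [Bool.not_eq_true] at h
      simp [List.dropWhile_cons, h, gAll, ih]

-- ==== B-side characterisation ====

lemma B_foldr (cs : List (List String)) :
    cs.foldr (fun x y => pvStepB y x) ([], []) =
      ((gAll cs).reverse, (cs.takeWhile (fun x => !pvIsInp x)).reverse) := by
  induction cs with
  | nil => simp [gAll]
  | cons c cs ih =>
    simp only [List.foldr_cons, ih]
    by_cases h : pvIsInp c = true
    · have h' : (PySem.List.pyGet? c 0 == some "inp") = true := h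
      have htw : List.takeWhile (fun x => !pvIsInp x) (c :: cs) = [] := by
        simp [h]
      have hg : gAll (c :: cs) = (c :: cs.takeWhile (fun x => !pvIsInp x)) :: gAll cs := by
        simp [gAll, h, gAll_dropWhile]
      simp [pvStepB, h', htw, hg]
    · have h' : (PySem.List.pyGet? c 0 == some "inp") = false := by
        simpa [pvIsInp] using h
      have hg : gAll (c :: cs) = gAll cs := by
        simp only [Bool.not_eq_true] at h
        simp [gAll, h]
      simp [pvStepB, h', List.takeWhile_cons, hg, pvIsInp]

lemma B_eq_enumerate (commands : List (List String)) :
    split_programs_alt commands = PySem.List.enumerate (gAll commands) 1 := by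
  unfold split_programs_alt
  rw [List.foldl_reverse, B_foldr]
  simp only
  rw [List.reverse_reverse]
  have h := PySem.Dict.items_foldl_insert_fresh (PySem.List.enumerate (gAll commands) 1)
    (fun p => p.1) (fun p => p.2) PySem.Dict.empty
    (by intro a _; exact PySem.Dict.contains_empty _)
    (by rw [PySem.List.map_fst_enumerate]; exact PySem.List.nodup_pyRange_one _ _)
  simpa [PySem.Dict.empty] using h

-- ==== A-side characterisation ====

lemma A_main (rest : List (List String)) :
    ∀ (q : List (Int × List (List String))) (n : Int) (c : List (List String)),
    (∀ k ∈ q.map Prod.fst, k < n - 1) → 2 ≤ n →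
    (rest.foldl pvStepA (PySem.Dict.mk (q ++ [(n - 1, c)]), n, c)).1.items
      = (q ++ [(n - 1, c ++ rest.takeWhile (fun x => !pvIsInp x))])
        ++ PySem.List.enumerate (gAll (rest.dropWhile (fun x => !pvIsInp x))) n := by
  induction rest with
  | nil => intro q n c _ _; simp [gAll, PySem.List.enumerate]
  | cons cmd rest ih =>
    intro q n c hq hn
    by_cases h : pvIsInp cmd = true
    · have h' : (PySem.List.pyGet? cmd 0 == some "inp") = true := h
      have hfresh : (PySem.Dict.mk (q ++ [(n - 1, c)])).contains n = false := by
        rw [PySem.Dict.contains_mk]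
        simp only [List.any_eq_false]
        rintro p hp
        rcases List.mem_append.mp hp with hp | hp
        · have := hq p.1 (List.mem_map_of_mem hp)
          simp; omega
        · simp only [List.mem_singleton] at hp
          subst hp; simp
      have hins := PySem.Dict.items_insert_of_not_contains
        (PySem.Dict.mk (q ++ [(n - 1, c)])) [cmd] hfresh
      simp only [List.foldl_cons, pvStepA, h', if_true]
      have hstep : (PySem.Dict.mk (q ++ [(n - 1, c)])).insert n [cmd]
          = PySem.Dict.mk ((q ++ [(n - 1, c)]) ++ [(n + 1 - 1, [cmd])]) := by
        apply PySem.Dict.ext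
        rw [hins]; simp
      rw [hstep]
      rw [ih (q ++ [(n - 1, c)]) (n + 1) [cmd]
        (by intro k hk
            simp only [List.map_append, List.mem_append] at hk
            rcases hk with hk | hk
            · have := hq k hk; omega
            · simp at hk; omega)
        (by omega)]
      have htw : (cmd :: rest).takeWhile (fun x => !pvIsInp x) = [] := by
        simp [h]
      have hdw : (cmd :: rest).dropWhile (fun x => !pvIsInp x) = cmd :: rest := by
        simp [h]
      rw [htw, hdw]
      simp only [gAll, if_pos h, PySem.List.enumerate_cons]
      simp
    · have h' : (PySem.List.pyGet? cmd 0 == some "inp") = false := by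
        simpa [pvIsInp] using h
      simp only [List.foldl_cons, pvStepA, h', Bool.false_eq_true, if_false, if_pos hn]
      have hcont : (PySem.Dict.mk (q ++ [(n - 1, c)])).contains (n - 1) = true := by
        rw [PySem.Dict.contains_mk]; simp
      have hmod : (PySem.Dict.mk (q ++ [(n - 1, c)])).modify (n - 1) [] (fun _ => c ++ [cmd])
          = PySem.Dict.mk (q ++ [(n - 1, c ++ [cmd])]) := by
        apply PySem.Dict.ext
        show ((PySem.Dict.mk (q ++ [(n - 1, c)])).insert (n - 1) _).items = _
        rw [PySem.Dict.items_insert_of_contains _ _ hcont]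
        rw [List.map_append]
        congr 1
        · conv_rhs => rw [← List.map_id q]
          apply List.map_congr_left
          intro p hp
          have : p.1 < n - 1 := hq p.1 (List.mem_map_of_mem hp)
          have : (p.1 == n - 1) = false := by simp; omega
          simp [this]
        · simp
      rw [hmod, ih q n (c ++ [cmd]) hq hn]
      have htw : (cmd :: rest).takeWhile (fun x => !pvIsInp x)
          = cmd :: rest.takeWhile (fun x => !pvIsInp x) := by
        simp [h]
      have hdw : (cmd :: rest).dropWhile (fun x => !pvIsInp x)
          = rest.dropWhile (fun x => !pvIsInp x) := by
        simp [h]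
      rw [htw, hdw]
      simp

lemma A_start (rest : List (List String)) :
    ∀ (c : List (List String)),
    (rest.foldl pvStepA (PySem.Dict.empty, 1, c)).1.items
      = PySem.List.enumerate (gAll rest) 1 := by
  induction rest with
  | nil => intro c; simp [gAll, PySem.Dict.empty]
  | cons cmd rest ih =>
    intro c
    by_cases h : pvIsInp cmd = true
    · have h' : (PySem.List.pyGet? cmd 0 == some "inp") = true := h
      simp only [List.foldl_cons, pvStepA, h', if_true]
      have hstep : (PySem.Dict.empty : PySem.Dict Int (List (List String))).insert 1 [cmd]
          = PySem.Dict.mk (([] : List (Int × List (List String))) ++ [(2 - 1, [cmd])]) := by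
        apply PySem.Dict.ext
        rw [PySem.Dict.items_insert_of_not_contains _ _ (PySem.Dict.contains_empty _)]
        simp [PySem.Dict.empty]
      rw [hstep, show (1:Int) + 1 = 2 from rfl, A_main rest [] 2 [cmd] (by simp) (by omega)]
      simp only [gAll, if_pos h, PySem.List.enumerate_cons]
      simp
    · have h' : (PySem.List.pyGet? cmd 0 == some "inp") = false := by
        simpa [pvIsInp] using h
      simp only [List.foldl_cons, pvStepA, h', Bool.false_eq_true, if_false]
      rw [if_neg (by omega), ih (c ++ [cmd])]
      simp only [Bool.not_eq_true] at h
      simp [gAll, h]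

-- ===== VERDICT (by name: the statement is the Claim_ definition above) =====
theorem split_programs_spec : Claim_equal_split_programs := by
  intro commands _ _
  show split_programs commands = split_programs_alt commands
  rw [B_eq_enumerate]
  unfold split_programs
  exact A_start commands []
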